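-- pv_equiv track=rewrite | github.com/kowi-kowi/RPA_projects | EDI/SE_EDI.py | getBasware
-- ===== SOURCE A (Python) =====
-- def getBasware(text): ###return number
--
--     #return customer number
--     key_words = ["Sender's ID:","Sender:", "Sender's Name:"]
--     #return customer name
--
--     #key_words = ["Sender's Name"]
--
--     keyword = "Sender's ID:"
--     keyword1 = "Sender: "
--     customerNumber = ''
--     table = text.split('\n')
--     lista = list()
--
--     for element in table:
--         if keyword in element:
--             lista.append(element)
--     if not lista:
--         keyword = keyword1
--         for element in table:
--             if keyword in element:
--                 lista.append(element)
--
--     if lista: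
--         customerNumber = lista[0][len(keyword):].strip()
--
--     if customerNumber:
--         return ' '+customerNumber+' '
--     else:
--         return '**********'
-- ===== SOURCE B (Python) =====
-- def getBasware(text):
--     # Single pass: remember the first line containing each keyword, then pick.
--     id_line = None
--     fb_line = None
--     for line in text.split('\n'):
--         if id_line is None and "Sender's ID:" in line:
--             id_line = line
--         if fb_line is None and "Sender: " in line:
--             fb_line = line
--     if id_line is not None:
--         num = id_line[12:].strip()
--     elif fb_line is not None:
--         num = fb_line[8:].strip()
--     else:
--         num = ''
--     return ' ' + num + ' ' if num else '**********'
-- ===== Notes on version B (the rewrite author's own statement) =====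
-- stated objective: simpler
-- what changed: Replaces the two filtering passes that build full match lists with a single pass that tracks just the first line containing each keyword, then slices with the per-keyword prefix length.
import Mathlib
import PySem

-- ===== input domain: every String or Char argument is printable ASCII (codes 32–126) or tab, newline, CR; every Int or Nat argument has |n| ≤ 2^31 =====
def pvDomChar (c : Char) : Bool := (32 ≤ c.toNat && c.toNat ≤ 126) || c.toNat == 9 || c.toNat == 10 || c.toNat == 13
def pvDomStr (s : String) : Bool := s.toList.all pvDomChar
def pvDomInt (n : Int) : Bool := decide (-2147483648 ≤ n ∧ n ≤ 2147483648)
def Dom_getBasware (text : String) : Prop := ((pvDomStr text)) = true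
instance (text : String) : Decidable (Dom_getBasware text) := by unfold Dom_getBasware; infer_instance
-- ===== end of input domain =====

-- B replaces A's two filtering passes (which build whole match lists) with a single pass
-- remembering only the first line containing each keyword; objective: simpler.

-- ===== PORT A =====
def getBasware (text : String) : String :=
  let keyword := "Sender's ID:"
  let keyword1 := "Sender: "
  let customerNumber := ""
  let table := (PySem.Str.split? text "\n").getD []
  let lista : List String :=
    table.foldl (fun acc el => if PySem.Str.isIn keyword el then acc ++ [el] else acc) []
  let kl : String × List String :=
    if lista = [] then
      (keyword1,
       table.foldl (fun acc el => if PySem.Str.isIn keyword1 el then acc ++ [el] else acc) lista)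
    else (keyword, lista)
  let customerNumber :=
    match kl.2 with
    | l0 :: _ => PySem.Str.strip (PySem.Str.slice l0 (some (PySem.Str.len kl.1)) none)
    | [] => customerNumber
  if customerNumber ≠ "" then " " ++ customerNumber ++ " " else "**********"

-- ===== PORT B =====
def getBasware_alt (text : String) : String :=
  let st : Option String × Option String :=
    ((PySem.Str.split? text "\n").getD []).foldl
      (fun (p : Option String × Option String) line =>
        ((if p.1.isNone && PySem.Str.isIn "Sender's ID:" line then some line else p.1),
         (if p.2.isNone && PySem.Str.isIn "Sender: " line then some line else p.2)))
      (none, none)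
  let num :=
    match st.1, st.2 with
    | some l, _ => PySem.Str.strip (PySem.Str.slice l (some 12) none)
    | none, some l => PySem.Str.strip (PySem.Str.slice l (some 8) none)
    | none, none => ""
  if num ≠ "" then " " ++ num ++ " " else "**********"

-- ===== PRECONDITION & SPEC =====
def Spec_getBasware (text : String) (out : String) : Prop := out = getBasware_alt text
instance (text : String) (out : String) : Decidable (Spec_getBasware text out) := by unfold Spec_getBasware; infer_instance

-- ===== CLAIM (what is proved, stated in full; the proofs are below) =====
def Claim_equal_getBasware : Prop := ∀ (text : String), Dom_getBasware text → Spec_getBasware text (getBasware text)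

-- ===== LEMMAS AND PROOFS =====

-- B's paired first-match fold computes `find?` for each keyword (seeded with any state).
lemma pair_foldl_find (q1 q2 : String → Bool) (lines : List String)
    (p : Option String × Option String) :
    lines.foldl
      (fun (p : Option String × Option String) line =>
        ((if p.1.isNone && q1 line then some line else p.1),
         (if p.2.isNone && q2 line then some line else p.2))) p
    = (p.1.orElse (fun _ => lines.find? q1), p.2.orElse (fun _ => lines.find? q2)) := by
  induction lines generalizing p with
  | nil => cases p with | mk a b => cases a <;> cases b <;> simp
  | cons h t ih =>
    simp only [List.foldl_cons, ih]
    cases hp : p.1 <;> cases hq : p.2 <;>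
      cases h1 : q1 h <;> cases h2 : q2 h <;>
        simp [List.find?, h1, h2]

-- the first element of a filter is the first match
lemma head?_filter_eq_find? (q : String → Bool) (l : List String) :
    (l.filter q).head? = l.find? q := by
  induction l with
  | nil => rfl
  | cons h t ih =>
    by_cases hq : q h = true <;> simp [List.find?, hq, ih]

theorem getBasware_eq_alt (text : String) : getBasware text = getBasware_alt text := by
  unfold getBasware getBasware_alt
  rw [pair_foldl_find]
  simp only [Option.orElse]
  rw [PySem.List.foldl_append_if_eq_filter, PySem.List.foldl_append_if_eq_filter]
  simp only [List.nil_append]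
  set table := (PySem.Str.split? text "\n").getD [] with htab
  cases hf1 : table.find? (fun el => PySem.Str.isIn "Sender's ID:" el) with
  | some l =>
    obtain ⟨rest, hfl⟩ : ∃ rest, table.filter (fun el => PySem.Str.isIn "Sender's ID:" el) = l :: rest := by
      have h1 := head?_filter_eq_find? (fun el => PySem.Str.isIn "Sender's ID:" el) table
      rw [hf1] at h1
      cases hc : table.filter (fun el => PySem.Str.isIn "Sender's ID:" el) with
      | nil => rw [hc] at h1; cases h1
      | cons a r =>
        refine ⟨r, ?_⟩
        rw [hc] at h1
        simp only [List.head?] at h1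
        injection h1 with h
        rw [h]
    rw [hfl]
    simp
  | none =>
    have h1 : table.filter (fun el => PySem.Str.isIn "Sender's ID:" el) = [] := by
      have := head?_filter_eq_find? (fun el => PySem.Str.isIn "Sender's ID:" el) table
      rw [hf1] at this
      exact List.head?_eq_none_iff.mp this
    rw [h1]
    cases hf2 : table.find? (fun el => PySem.Str.isIn "Sender: " el) with
    | some l =>
      obtain ⟨rest, hfl⟩ : ∃ rest, table.filter (fun el => PySem.Str.isIn "Sender: " el) = l :: rest := by
        have h2 := head?_filter_eq_find? (fun el => PySem.Str.isIn "Sender: " el) table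
        rw [hf2] at h2
        cases hc : table.filter (fun el => PySem.Str.isIn "Sender: " el) with
        | nil => rw [hc] at h2; cases h2
        | cons a r =>
          refine ⟨r, ?_⟩
          rw [hc] at h2
          simp only [List.head?] at h2
          injection h2 with h
          rw [h]
      rw [hfl]
      simp
    | none =>
      have h2 : table.filter (fun el => PySem.Str.isIn "Sender: " el) = [] := by
        have := head?_filter_eq_find? (fun el => PySem.Str.isIn "Sender: " el) table
        rw [hf2] at this
        exact List.head?_eq_none_iff.mp this
      rw [h2]
      simp

-- ===== VERDICT (by name: the statement is the Claim_ definition above) =====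
theorem getBasware_spec : Claim_equal_getBasware := by
  intro text _
  unfold Spec_getBasware
  exact getBasware_eq_alt text
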